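-- pv_equiv track=rewrite | github.com/pypi-data/pypi-mirror-370 | packages/figpack/figpack-0.1.5-py3-none-any.whl/figpack/core/_upload_bundle.py | _is_zarr_chunk
-- ===== SOURCE A (Python) =====
-- def _is_zarr_chunk(file_name: str) -> bool:
--     """
--     Check if filename consists only of numbers and dots (zarr chunk pattern)
--     """
--     for char in file_name:
--         if char != "." and not char.isdigit():
--             return False
--     return (
--         len(file_name) > 0
--         and not file_name.startswith(".")
--         and not file_name.endswith(".")
--     )
-- ===== SOURCE B (Python) =====
-- def _is_zarr_chunk(file_name: str) -> bool:
--     """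
--     Check if filename consists only of numbers and dots (zarr chunk pattern)
--     """
--     # Deterministic finite automaton, one pass, no boundary re-scans:
--     # state 0 = start, 1 = just read a digit (accepting), 2 = just read a dot.
--     state = 0
--     for char in file_name:
--         if char.isdigit():
--             state = 1
--         elif char == "." and state != 0:
--             state = 2
--         else:
--             return False
--     return state == 1
-- ===== Notes on version B (the rewrite author's own statement) =====
-- stated objective: alternative
-- what changed: Replaces A's character-set loop plus three separate boundary guards (len, startswith, endswith) with a single-pass three-state finite automaton whose final state alone decides acceptance.
import Mathlib
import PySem

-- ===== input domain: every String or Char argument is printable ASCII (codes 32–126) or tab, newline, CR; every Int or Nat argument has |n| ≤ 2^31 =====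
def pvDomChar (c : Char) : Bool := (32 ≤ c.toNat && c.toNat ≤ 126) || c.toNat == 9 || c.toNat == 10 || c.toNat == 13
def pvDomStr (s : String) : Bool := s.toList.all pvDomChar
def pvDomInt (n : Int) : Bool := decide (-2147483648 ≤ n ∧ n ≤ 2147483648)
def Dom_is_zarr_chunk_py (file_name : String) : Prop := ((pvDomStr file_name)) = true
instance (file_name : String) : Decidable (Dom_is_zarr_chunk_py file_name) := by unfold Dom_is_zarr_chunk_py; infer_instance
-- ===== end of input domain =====

-- B replaces A's character-set loop plus three boundary guards by a single-pass
-- three-state finite automaton; same result, alternative structure.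

-- ===== PORT A =====
-- the for-loop with its early 'return False'
def zarrLoopA : List Char → Bool
  | [] => true
  | c :: cs => if c != '.' && !(PySem.Chars.isdigit c) then false else zarrLoopA cs

def is_zarr_chunk_py (file_name : String) : Bool :=
  match zarrLoopA file_name.toList with
  | false => false
  | true =>
      decide (PySem.Str.len file_name > 0)
        && !(PySem.Str.startswith file_name ".")
        && !(PySem.Str.endswith file_name ".")

-- ===== PORT B =====
-- the DFA loop: state 0 = start, 1 = after a digit (accepting), 2 = after a dot
def zarrDFA : List Char → Nat → Bool
  | [], st => st == 1
  | c :: cs, st =>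
      if PySem.Chars.isdigit c then zarrDFA cs 1
      else if c == '.' && st != 0 then zarrDFA cs 2
      else false

def is_zarr_chunk_py_alt (file_name : String) : Bool :=
  zarrDFA file_name.toList 0

-- ===== PRECONDITION & SPEC =====
def Spec_is_zarr_chunk_py (file_name : String) (out : Bool) : Prop := out = is_zarr_chunk_py_alt file_name
instance (file_name : String) (out : Bool) : Decidable (Spec_is_zarr_chunk_py file_name out) := by unfold Spec_is_zarr_chunk_py; infer_instance

-- ===== CLAIM (what is proved, stated in full; the proofs are below) =====
def Claim_equal_is_zarr_chunk_py : Prop := ∀ (file_name : String), Dom_is_zarr_chunk_py file_name → Spec_is_zarr_chunk_py file_name (is_zarr_chunk_py file_name)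

-- ===== LEMMAS AND PROOFS =====

-- A's loop equals 'every char is a dot or a digit'
lemma zarrLoopA_eq_all (cs : List Char) :
    zarrLoopA cs = cs.all (fun c => c == '.' || PySem.Chars.isdigit c) := by
  induction cs with
  | nil => rfl
  | cons c t ih =>
      cases h : (c == '.') <;> cases hd : PySem.Chars.isdigit c <;>
        simp [zarrLoopA, ih, h, hd, bne]

-- B's DFA from a running state: all chars valid and the effective last char is a digit
lemma zarrDFA_run (cs : List Char) : ∀ c : Char,
    zarrDFA cs (if PySem.Chars.isdigit c then 1 else 2)
      = (cs.all (fun x => x == '.' || PySem.Chars.isdigit x)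
          && PySem.Chars.isdigit (cs.getLastD c)) := by
  induction cs with
  | nil =>
      intro c
      by_cases h : PySem.Chars.isdigit c <;> simp [zarrDFA, h]
  | cons d u ih =>
      intro c
      have hstep : zarrDFA (d :: u) (if PySem.Chars.isdigit c then 1 else 2)
          = ((d == '.' || PySem.Chars.isdigit d)
              && zarrDFA u (if PySem.Chars.isdigit d then 1 else 2)) := by
        by_cases hd : PySem.Chars.isdigit d
        · by_cases hc : PySem.Chars.isdigit c <;> simp [zarrDFA, hd]
        · have hdig : PySem.Chars.isdigit '.' = false := by decide
          by_cases hdot : d = '.'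
          · by_cases hc : PySem.Chars.isdigit c <;>
              simp [zarrDFA, hdot, hdig, hc]
          · by_cases hc : PySem.Chars.isdigit c <;>
              simp [zarrDFA, hd, hc, beq_eq_false_iff_ne.mpr hdot]
      rw [hstep, ih d, List.getLastD_cons]
      simp [Bool.and_assoc]

-- endswith '.' on a nonempty list is 'the last char is a dot'
lemma endswith_dot (c : Char) (t : List Char) :
    PySem.Chars.endswith (c :: t) ['.'] = (t.getLastD c == '.') := by
  have hg : (c :: t).getLast? = some (t.getLastD c) := by
    induction t generalizing c with
    | nil => rfl
    | cons d u ih => rw [List.getLast?_cons_cons, ih d, List.getLastD_cons]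
  cases hdot : (t.getLastD c == '.') with
  | true =>
      rcases List.getLast?_eq_some_iff.mp hg with ⟨ys, hys⟩
      exact (PySem.Chars.endswith_iff _ _).mpr ⟨ys, by rw [hys, eq_of_beq hdot]⟩
  | false =>
      by_contra h
      have h' : PySem.Chars.endswith (c :: t) ['.'] = true := by
        cases he : PySem.Chars.endswith (c :: t) ['.'] with
        | true => rfl
        | false => exact absurd he h
      rcases (PySem.Chars.endswith_iff _ _).mp h' with ⟨ys, hys⟩
      have : (c :: t).getLast? = some '.' := by rw [← hys]; simp
      rw [hg] at this
      simp_all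
-- a valid char is a digit iff it is not the dot
lemma not_dot_eq_isdigit (x : Char) (h : (x == '.' || PySem.Chars.isdigit x) = true) :
    (!(x == '.')) = PySem.Chars.isdigit x := by
  by_cases hx : x = '.'
  · subst hx; decide
  · simp [beq_eq_false_iff_ne.mpr hx] at h
    simp [beq_eq_false_iff_ne.mpr hx, h]

-- the whole equivalence over the character list
lemma zarr_core (cs : List Char) :
    (match cs.all (fun c => c == '.' || PySem.Chars.isdigit c) with
      | false => false
      | true =>
          decide ((cs.length : Int) > 0) && !PySem.Chars.startswith cs ['.']
            && !PySem.Chars.endswith cs ['.'])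
    = zarrDFA cs 0 := by
  cases cs with
  | nil => rfl
  | cons c t =>
      by_cases hd : PySem.Chars.isdigit c
      · have hc : ¬ c = '.' := by
          intro h; rw [h] at hd; exact absurd hd (by decide)
        have hst : PySem.Chars.startswith (c :: t) ['.'] = false := by
          cases h : PySem.Chars.startswith (c :: t) ['.'] with
          | false => rfl
          | true =>
              rcases (PySem.Chars.startswith_iff _ _).mp h with ⟨ys, hys⟩
              cases hys; exact absurd rfl hc
        have hdfa : zarrDFA (c :: t) 0 = zarrDFA t 1 := by simp [zarrDFA, hd]
        have hrun := zarrDFA_run t c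
        rw [if_pos hd] at hrun
        rw [hdfa, hrun, endswith_dot]
        cases hall : t.all (fun x => x == '.' || PySem.Chars.isdigit x) with
        | false => simp [hall, hd]
        | true =>
            have hmem : t.getLastD c = c ∨ t.getLastD c ∈ t := by
              cases hl : t.getLast? with
              | none =>
                  left
                  have ht : t = [] := by cases t <;> simp_all
                  subst ht; rfl
              | some d =>
                  right
                  have he : t.getLastD c = d := by
                    simp [List.getLastD_eq_getLast?, hl]
                  rw [he]; exact List.mem_of_getLast? hl
            have hv : (t.getLastD c == '.' || PySem.Chars.isdigit (t.getLastD c)) = true := by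
              rcases hmem with he | hm
              · rw [he]; simp [hd]
              · exact List.all_eq_true.mp hall _ hm
            have hnd := not_dot_eq_isdigit _ hv
            simp only [List.getLastD_eq_getLast?] at hnd
            simp [hall, hd, hst, hnd]
      · by_cases hc : c = '.'
        · subst hc
          have hst : PySem.Chars.startswith ('.' :: t) ['.'] = true :=
            (PySem.Chars.startswith_iff _ _).mpr ⟨t, rfl⟩
          have hdfa : zarrDFA ('.' :: t) 0 = false := by simp [zarrDFA, hd]
          rw [hdfa, hst]
          cases ('.' :: t).all (fun x => x == '.' || PySem.Chars.isdigit x) <;> simp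
        · have hdfa : zarrDFA (c :: t) 0 = false := by simp [zarrDFA, hd, hc]
          have hall : ((c :: t).all (fun x => x == '.' || PySem.Chars.isdigit x)) = false := by
            simp [hd, beq_eq_false_iff_ne.mpr hc]
          rw [hdfa, hall]

-- ===== VERDICT (by name: the statement is the Claim_ definition above) =====
theorem is_zarr_chunk_py_spec : Claim_equal_is_zarr_chunk_py := by
  intro s _
  unfold Spec_is_zarr_chunk_py is_zarr_chunk_py is_zarr_chunk_py_alt
  rw [zarrLoopA_eq_all]
  have htl : (".".toList) = ['.'] := by decide
  simp only [PySem.Str.len_eq, PySem.Str.startswith_eq, PySem.Str.endswith_eq, htl]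
  exact zarr_core s.toList
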